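-- pv_equiv track=rewrite | github.com/jprivillaso/advent-of-code-2023 | day11/problem1.py | expand_matrix
-- ===== SOURCE A (Python) =====
-- def expand_matrix(matrix, special_rows, special_cols):
--   new_matrix = []
--
--   for i in range(len(matrix)):
--     if i in special_rows:
--       row = []
--       for j in range(len(matrix[0])):
--         row.append(".")
--
--         if j in special_cols:
--           row.append(".")
--
--       new_matrix.append(row)
--       new_matrix.append(row)
--     else:
--       row = []
--       for j in range(len(matrix[0])):
--         row.append(matrix[i][j])
--
--         if j in special_cols:
--           row.append(".")
--
--       new_matrix.append(row)
--
--   return new_matrix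
-- ===== SOURCE B (Python) =====
-- def expand_matrix(matrix, special_rows, special_cols):
--   width = len(matrix[0]) if matrix else 0
--   col_map = [c for j in range(width)
--                for c in ([j, -1] if j in special_cols else [j])]
--   row_map = [r for i in range(len(matrix))
--                for r in ([-1, -1] if i in special_rows else [i])]
--   return [["." if r < 0 or c < 0 else matrix[r][c] for c in col_map]
--           for r in row_map]
-- ===== Notes on version B (the rewrite author's own statement) =====
-- stated objective: faster
-- what changed: B precomputes index maps (row_map/col_map with -1 sentinels for inserted dot rows/columns) with one membership test per row/column index, then materialises the output as one nested-comprehension gather, instead of A's imperative fold that re-scans special_rows/special_cols with list membership inside every cell append.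
import Mathlib
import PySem

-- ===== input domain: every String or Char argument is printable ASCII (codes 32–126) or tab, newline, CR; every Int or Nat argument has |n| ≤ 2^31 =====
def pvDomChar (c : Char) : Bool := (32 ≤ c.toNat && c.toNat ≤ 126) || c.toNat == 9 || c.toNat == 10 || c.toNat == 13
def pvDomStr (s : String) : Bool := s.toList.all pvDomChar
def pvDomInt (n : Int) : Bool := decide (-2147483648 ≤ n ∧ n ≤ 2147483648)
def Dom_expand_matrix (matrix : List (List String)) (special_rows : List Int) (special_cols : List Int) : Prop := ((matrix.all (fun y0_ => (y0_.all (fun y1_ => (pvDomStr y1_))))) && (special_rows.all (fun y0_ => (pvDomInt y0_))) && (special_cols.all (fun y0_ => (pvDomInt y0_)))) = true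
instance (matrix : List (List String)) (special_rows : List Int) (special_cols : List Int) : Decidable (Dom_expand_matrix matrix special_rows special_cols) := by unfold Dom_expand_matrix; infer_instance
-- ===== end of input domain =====

-- B rebuilds the output as an index-map gather (row_map/col_map with -1 sentinels for inserted
-- dot rows/columns, then one nested map) instead of A's imperative appending fold; same values.

-- ===== PORT A =====
-- literal port: matrix[i][j] → pyGetD (total with a default; Pre_ excludes the IndexError inputs)
def expand_matrix (matrix : List (List String)) (special_rows : List Int) (special_cols : List Int) : List (List String) :=
  (PySem.List.pyRange 0 matrix.length 1).foldl (fun new_matrix i =>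
    if i ∈ special_rows then
      let row := (PySem.List.pyRange 0 (PySem.List.pyGetD matrix 0 []).length 1).foldl
        (fun row j =>
          let row := row ++ ["."]
          if j ∈ special_cols then row ++ ["."] else row) []
      (new_matrix ++ [row]) ++ [row]
    else
      let row := (PySem.List.pyRange 0 (PySem.List.pyGetD matrix 0 []).length 1).foldl
        (fun row j =>
          let row := row ++ [PySem.List.pyGetD (PySem.List.pyGetD matrix i []) j ""]
          if j ∈ special_cols then row ++ ["."] else row) []
      new_matrix ++ [row]) []

-- ===== PORT B =====
def expand_matrix_alt (matrix : List (List String)) (special_rows : List Int) (special_cols : List Int) : List (List String) :=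
  let width : Int := if matrix = [] then 0 else (PySem.List.pyGetD matrix 0 []).length
  let col_map := (PySem.List.pyRange 0 width 1).flatMap
    (fun j => if j ∈ special_cols then [j, -1] else [j])
  let row_map := (PySem.List.pyRange 0 matrix.length 1).flatMap
    (fun i => if i ∈ special_rows then [-1, -1] else [i])
  row_map.map (fun r => col_map.map (fun c =>
    if r < 0 ∨ c < 0 then "."
    else PySem.List.pyGetD (PySem.List.pyGetD matrix r []) c ""))

-- ===== PRECONDITION & SPEC =====
-- Pre_ excludes exactly the inputs where Python A raises IndexError: a non-special row shorter than row 0.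
def Pre_expand_matrix (matrix : List (List String)) (special_rows : List Int) (special_cols : List Int) : Prop :=
  ∀ i : Fin matrix.length, ((i : Int) ∈ special_rows) ∨ (PySem.List.pyGetD matrix 0 []).length ≤ matrix[i].length
instance (matrix : List (List String)) (special_rows : List Int) (special_cols : List Int) : Decidable (Pre_expand_matrix matrix special_rows special_cols) := by unfold Pre_expand_matrix; infer_instance
def pvWitness_expand_matrix : List (List String) × List Int × List Int := ([[".", "#"], ["#", "."]], [0], [1])

def Spec_expand_matrix (matrix : List (List String)) (special_rows : List Int) (special_cols : List Int) (out : List (List String)) : Prop := out = expand_matrix_alt matrix special_rows special_cols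
instance (matrix : List (List String)) (special_rows : List Int) (special_cols : List Int) (out : List (List String)) : Decidable (Spec_expand_matrix matrix special_rows special_cols out) := by unfold Spec_expand_matrix; infer_instance

-- ===== CLAIM =====
def Claim_equal_expand_matrix : Prop := ∀ (matrix : List (List String)) (special_rows : List Int) (special_cols : List Int), Dom_expand_matrix matrix special_rows special_cols → Pre_expand_matrix matrix special_rows special_cols → Spec_expand_matrix matrix special_rows special_cols (expand_matrix matrix special_rows special_cols)

-- ===== LEMMAS AND PROOFS =====

-- A's non-special inner loop equals B's gather row at a fixed nonnegative row index r.
theorem innerA_eq_gather (sc : List Int) (w : Int) (matrix : List (List String)) (r : Int) (hr : 0 ≤ r) :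
    (PySem.List.pyRange 0 w 1).foldl
      (fun row j =>
        let row := row ++ [PySem.List.pyGetD (PySem.List.pyGetD matrix r []) j ""]
        if j ∈ sc then row ++ ["."] else row) []
      = ((PySem.List.pyRange 0 w 1).flatMap (fun j => if j ∈ sc then [j, -1] else [j])).map
          (fun c => if r < 0 ∨ c < 0 then "."
                    else PySem.List.pyGetD (PySem.List.pyGetD matrix r []) c "") := by
  rw [List.map_flatMap]
  have h1 : (PySem.List.pyRange 0 w 1).foldl
      (fun row j =>
        let row := row ++ [PySem.List.pyGetD (PySem.List.pyGetD matrix r []) j ""]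
        if j ∈ sc then row ++ ["."] else row) []
      = (PySem.List.pyRange 0 w 1).foldl
      (fun row j => row ++ ((if j ∈ sc then [j, -1] else [j]).map
          (fun c => if r < 0 ∨ c < 0 then "."
                    else PySem.List.pyGetD (PySem.List.pyGetD matrix r []) c ""))) [] := by
    apply PySem.List.foldl_congr_mem
    intro acc j hj
    have hj0 : 0 ≤ j := ((PySem.List.mem_pyRange_one).mp hj).1
    by_cases h : j ∈ sc <;>
      simp [h, not_or, not_lt.mpr hr, not_lt.mpr hj0]
  rw [h1, PySem.List.foldl_append_eq_flatMap]
  simp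

-- A's special (all-dots) inner loop equals B's gather row at r = -1.
theorem innerA_special_eq_gather (sc : List Int) (w : Int) (matrix : List (List String)) :
    (PySem.List.pyRange 0 w 1).foldl
      (fun row j =>
        let row := row ++ ["."]
        if j ∈ sc then row ++ ["."] else row) []
      = ((PySem.List.pyRange 0 w 1).flatMap (fun j => if j ∈ sc then [j, -1] else [j])).map
          (fun c => if (-1 : Int) < 0 ∨ c < 0 then "."
                    else PySem.List.pyGetD (PySem.List.pyGetD matrix (-1) []) c "") := by
  rw [List.map_flatMap]
  have h1 : (PySem.List.pyRange 0 w 1).foldl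
      (fun row j =>
        let row := row ++ ["."]
        if j ∈ sc then row ++ ["."] else row) []
      = (PySem.List.pyRange 0 w 1).foldl
      (fun row j => row ++ ((if j ∈ sc then [j, -1] else [j]).map
          (fun c => if (-1 : Int) < 0 ∨ c < 0 then "."
                    else PySem.List.pyGetD (PySem.List.pyGetD matrix (-1) []) c ""))) [] := by
    apply PySem.List.foldl_congr_mem
    intro acc j _
    by_cases h : j ∈ sc <;> simp [h]
  rw [h1, PySem.List.foldl_append_eq_flatMap]
  simp

theorem expand_matrix_eq (matrix : List (List String)) (special_rows : List Int) (special_cols : List Int) :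
    expand_matrix matrix special_rows special_cols = expand_matrix_alt matrix special_rows special_cols := by
  unfold expand_matrix expand_matrix_alt
  by_cases hnil : matrix = []
  · subst hnil; simp [PySem.List.pyRange]
  · rw [if_neg hnil]
    rw [List.map_flatMap]
    have h1 : (PySem.List.pyRange 0 (matrix.length : Int) 1).foldl (fun new_matrix i =>
        if i ∈ special_rows then
          let row := (PySem.List.pyRange 0 ((PySem.List.pyGetD matrix 0 []).length : Int) 1).foldl
            (fun row j =>
              let row := row ++ ["."]
              if j ∈ special_cols then row ++ ["."] else row) []
          (new_matrix ++ [row]) ++ [row]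
        else
          let row := (PySem.List.pyRange 0 ((PySem.List.pyGetD matrix 0 []).length : Int) 1).foldl
            (fun row j =>
              let row := row ++ [PySem.List.pyGetD (PySem.List.pyGetD matrix i []) j ""]
              if j ∈ special_cols then row ++ ["."] else row) []
          new_matrix ++ [row]) []
        = (PySem.List.pyRange 0 (matrix.length : Int) 1).foldl (fun new_matrix i =>
            new_matrix ++ ((if i ∈ special_rows then [-1, -1] else [i]).map
              (fun r => ((PySem.List.pyRange 0 ((PySem.List.pyGetD matrix 0 []).length : Int) 1).flatMap
                  (fun j => if j ∈ special_cols then [j, -1] else [j])).map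
                (fun c => if r < 0 ∨ c < 0 then "."
                          else PySem.List.pyGetD (PySem.List.pyGetD matrix r []) c "")))) [] := by
      apply PySem.List.foldl_congr_mem
      intro acc i hi
      have hi0 : 0 ≤ i := ((PySem.List.mem_pyRange_one).mp hi).1
      by_cases hr : i ∈ special_rows
      · simp only [hr, if_true, List.map_cons, List.map_nil,
          innerA_special_eq_gather special_cols _ matrix]
        simp
      · simp only [hr, if_false, List.map_cons, List.map_nil,
          innerA_eq_gather special_cols _ matrix i hi0]
    rw [h1, PySem.List.foldl_append_eq_flatMap]
    simp

-- ===== VERDICT =====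
theorem expand_matrix_spec : Claim_equal_expand_matrix := by
  intro matrix special_rows special_cols _ _
  unfold Spec_expand_matrix
  exact expand_matrix_eq matrix special_rows special_cols
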